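-- pv_equiv track=rewrite | github.com/AnujaGaikwad/Python- | 03_bot.py | should_reply
-- ===== SOURCE A (Python) =====
-- def should_reply(chat_log, blocked_sender="anu"):
--     lines = chat_log.strip().splitlines()
--
--     # Traverse from bottom to find the last real message
--     for line in reversed(lines):
--         line = line.strip()
--         if not line:
--             continue
--
--         # WhatsApp format -> [time, date] name: message
--         if "]" in line and ":" in line:
--             try:
--                 name_part = line.split("]")[1].split(":")[0].strip()
--             except:
--                 return False
--
--             # If LAST message sender is blocked -> do NOT reply
--             return name_part.lower() != blocked_sender.lower()
--
--     return False
-- ===== SOURCE B (Python) =====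
-- def should_reply(chat_log, blocked_sender="anu"):
--     # Forward pass with a running verdict: every well-formed message overwrites it,
--     # so the final value is the last message's verdict; no reversal, no early exit.
--     target = blocked_sender.lower()
--     verdict = False
--     for raw in chat_log.strip().splitlines():
--         s = raw.strip()
--         if s and "]" in s and ":" in s:
--             verdict = s.split("]")[1].split(":")[0].strip().lower() != target
--     return verdict
-- ===== Notes on version B (the rewrite author's own statement) =====
-- stated objective: alternative
-- what changed: A scans the reversed line list and early-returns at the first well-formed message; B never reverses or selects a line: it makes one forward pass keeping a running Bool verdict that every well-formed message overwrites (sender name extracted and compared per message), so the final accumulator is the answer.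
import Mathlib
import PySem

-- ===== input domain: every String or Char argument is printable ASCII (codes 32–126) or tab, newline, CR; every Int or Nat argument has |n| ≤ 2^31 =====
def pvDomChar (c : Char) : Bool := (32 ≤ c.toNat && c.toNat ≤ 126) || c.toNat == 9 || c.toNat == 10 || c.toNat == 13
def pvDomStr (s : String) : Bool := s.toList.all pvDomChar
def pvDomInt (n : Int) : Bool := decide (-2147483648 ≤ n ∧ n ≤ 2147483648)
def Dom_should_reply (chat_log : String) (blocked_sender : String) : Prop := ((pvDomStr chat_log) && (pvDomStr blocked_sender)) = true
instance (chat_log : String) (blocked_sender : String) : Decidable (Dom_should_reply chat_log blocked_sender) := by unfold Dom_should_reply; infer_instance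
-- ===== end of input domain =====

-- B replaces A's reversed early-return scan by one forward pass with a running Bool
-- verdict overwritten at every well-formed message (same return value).

-- ===== PORT A =====
-- line.split("]")[1].split(":")[0].strip(); none = IndexError (unreachable when "]" is in line)
def pvNamePart (line : String) : Option String :=
  match PySem.List.pyGet? ((PySem.Str.split? line "]").getD []) 1 with
  | none => none
  | some part1 =>
    match PySem.List.pyGet? ((PySem.Str.split? part1 ":").getD []) 0 with
    | none => none
    | some part0 => some (PySem.Str.strip part0)

-- A's reversed for-loop: strip, skip empty, answer at the first line containing both "]" and ":"
def pvScanA : List String → String → Bool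
  | [], _ => false
  | line :: rest, bs =>
    let s := PySem.Str.strip line
    if s == "" then pvScanA rest bs
    else if PySem.Str.isIn "]" s && PySem.Str.isIn ":" s then
      match pvNamePart s with
      | none => false   -- the `except: return False` path
      | some np => !(PySem.Str.lower np == PySem.Str.lower bs)
    else pvScanA rest bs

def should_reply (chat_log : String) (blocked_sender : String) : Bool :=
  pvScanA ((PySem.Str.splitlines (PySem.Str.strip chat_log)).reverse) blocked_sender

-- ===== PORT B =====
-- the loop body of Source B: overwrite the running verdict at every well-formed message
def pvStepB (target : String) (verdict : Bool) (raw : String) : Bool :=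
  let s := PySem.Str.strip raw
  if !(s == "") && PySem.Str.isIn "]" s && PySem.Str.isIn ":" s then
    match pvNamePart s with
    | none => verdict   -- unreachable: "]" is in s, so split("]")[1] exists
    | some np => !(PySem.Str.lower np == target)
  else verdict

def should_reply_alt (chat_log : String) (blocked_sender : String) : Bool :=
  let target := PySem.Str.lower blocked_sender
  (PySem.Str.splitlines (PySem.Str.strip chat_log)).foldl (pvStepB target) false

-- ===== PRECONDITION & SPEC =====
def Spec_should_reply (chat_log : String) (blocked_sender : String) (out : Bool) : Prop := out = should_reply_alt chat_log blocked_sender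
instance (chat_log : String) (blocked_sender : String) (out : Bool) : Decidable (Spec_should_reply chat_log blocked_sender out) := by unfold Spec_should_reply; infer_instance

-- ===== CLAIM (what is proved, stated in full; the proofs are below) =====
def Claim_equal_should_reply : Prop := ∀ (chat_log : String) (blocked_sender : String), Dom_should_reply chat_log blocked_sender → Spec_should_reply chat_log blocked_sender (should_reply chat_log blocked_sender)

-- ===== LEMMAS AND PROOFS =====

-- the candidate test (stripped line non-empty and contains "]" and ":")
def pvCand (l : String) : Bool :=
  let s := PySem.Str.strip l
  !(s == "") && PySem.Str.isIn "]" s && PySem.Str.isIn ":" s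

-- what both ports do with a well-formed line
def pvHandle (s bs : String) : Bool :=
  match pvNamePart s with
  | none => false
  | some np => !(PySem.Str.lower np == PySem.Str.lower bs)

-- splitOn.go returns at least acc.length + 1 pieces
theorem pvGoLen (sep : List Char) (fuel : Nat) (l cur : List Char) (acc : List (List Char)) :
    acc.length + 1 ≤ (PySem.Chars.splitOn.go sep fuel l cur acc).length := by
  induction fuel generalizing l cur acc with
  | zero => simp [PySem.Chars.splitOn.go]
  | succ n ih =>
    cases l with
    | nil => simp [PySem.Chars.splitOn.go]
    | cons c rest =>
      rw [PySem.Chars.splitOn.go]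
      split
      · have := ih (List.drop sep.length (c :: rest)) [] (cur.reverse :: acc)
        simpa using le_trans (by simp) this
      · exact ih rest (c :: cur) acc

-- with sep a non-empty infix of l and enough fuel, at least acc.length + 2 pieces
theorem pvGoLen2 (sep : List Char) (fuel : Nat) (l cur : List Char) (acc : List (List Char))
    (hsep : sep ≠ []) (hinf : sep <:+: l) (hfuel : l.length ≤ fuel) :
    acc.length + 2 ≤ (PySem.Chars.splitOn.go sep fuel l cur acc).length := by
  induction fuel generalizing l cur acc with
  | zero =>
    have : l = [] := by cases l <;> simp_all
    subst this
    exact absurd (List.eq_nil_of_infix_nil hinf) hsep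
  | succ n ih =>
    cases l with
    | nil => exact absurd (List.eq_nil_of_infix_nil hinf) hsep
    | cons c rest =>
      rw [PySem.Chars.splitOn.go]
      split
      · have := pvGoLen sep n (List.drop sep.length (c :: rest)) [] (cur.reverse :: acc)
        simpa using le_trans (by simp) this
      · rename_i hp
        have hinf' : sep <:+: rest := by
          obtain ⟨s, t, hst⟩ := hinf
          cases s with
          | nil =>
            exact absurd (List.isPrefixOf_iff_prefix.mpr ⟨t, by simpa using hst⟩) hp
          | cons a s' =>
            refine ⟨s', t, ?_⟩
            simpa using congrArg List.tail hst
        exact ih rest (c :: cur) acc hinf' (by simpa using Nat.le_of_succ_le_succ (by simpa using hfuel))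

-- split always yields at least one piece
theorem pvSplitOn_ne_nil (s sep : List Char) : PySem.Chars.splitOn s sep ≠ [] := by
  have := pvGoLen sep (s.length + 1) s [] []
  intro h
  rw [PySem.Chars.splitOn] at h
  simp [h] at this

-- when sep is a non-empty infix, split yields at least two pieces
theorem pvSplitOn_two (s sep : List Char) (hsep : sep ≠ []) (hinf : sep <:+: s) :
    2 ≤ (PySem.Chars.splitOn s sep).length := by
  have := pvGoLen2 sep (s.length + 1) s [] [] hsep hinf (by omega)
  simpa [PySem.Chars.splitOn] using this

-- hence the name extraction never hits the IndexError path on a well-formed line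
theorem pvNamePart_isSome (s : String) (h : PySem.Str.isIn "]" s = true) :
    ∃ np, pvNamePart s = some np := by
  have hinf : ("]".toList) <:+: s.toList := by
    have := (PySem.Chars.isIn_iff_infix (sub := "]".toList) (s := s.toList)).mp (by simpa using h)
    exact this
  have h2 : 2 ≤ (PySem.Chars.splitOn s.toList "]".toList).length := by
    apply pvSplitOn_two _ _ (by decide) hinf
  obtain ⟨a, b, tl, hsp⟩ : ∃ a b tl, PySem.Chars.splitOn s.toList "]".toList = a :: b :: tl := by
    rcases hx : PySem.Chars.splitOn s.toList "]".toList with _ | ⟨a, _ | ⟨b, tl⟩⟩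
    · rw [hx] at h2; simp at h2
    · rw [hx] at h2; simp at h2
    · exact ⟨a, b, tl, rfl⟩
  unfold pvNamePart
  simp only [PySem.Str.split?, PySem.Chars.split?, if_neg (by decide : ¬("]".toList.isEmpty = true)), hsp]
  simp only [List.map_cons, Option.map_some, Option.getD_some]
  have hget1 : PySem.List.pyGet? (String.ofList a :: String.ofList b :: tl.map String.ofList) 1
      = some (String.ofList b) := by
    simp [PySem.List.pyGet?, PySem.List.pyIdx?]
  rw [hget1]
  have hne : PySem.Chars.splitOn (String.ofList b).toList ":".toList ≠ [] := pvSplitOn_ne_nil _ _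
  simp only [if_neg (by decide : ¬(":".toList.isEmpty = true))]
  rcases hb2 : PySem.Chars.splitOn (String.ofList b).toList ":".toList with _ | ⟨x, xs⟩
  · exact absurd hb2 hne
  · simp [PySem.List.pyGet?, PySem.List.pyIdx?]

-- A's scan is `find?` of the candidate predicate, handling the stripped hit
theorem pvScanA_eq_find? (rs : List String) (bs : String) :
    pvScanA rs bs =
      match rs.find? pvCand with
      | none => false
      | some l => pvHandle (PySem.Str.strip l) bs := by
  induction rs with
  | nil => rfl
  | cons line rest ih =>
    by_cases hs : PySem.Str.strip line == ""
    · have hp : pvCand line = false := by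
        simp only [pvCand, hs, Bool.not_true, Bool.false_and]
      rw [List.find?_cons_of_neg (by simpa using hp)]
      simp only [pvScanA, if_pos hs]
      exact ih
    · have hb : (PySem.Str.strip line == "") = false := by simpa using hs
      cases h1 : PySem.Str.isIn "]" (PySem.Str.strip line) <;>
        cases h2 : PySem.Str.isIn ":" (PySem.Str.strip line)
      all_goals
        first
        | · have hp : pvCand line = false := by
              simp only [pvCand, hb, h1, h2, Bool.not_false, Bool.and_false, Bool.and_true]
            rw [List.find?_cons_of_neg (by simpa using hp)]
            simp only [pvScanA, if_neg hs, h1, h2, Bool.and_false, Bool.false_and,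
              if_neg (by simp : ¬(false = true))]
            exact ih
        | · have hp : pvCand line = true := by
              simp only [pvCand, hb, h1, h2, Bool.not_false, Bool.and_true]
            rw [List.find?_cons_of_pos (by simpa using hp)]
            simp only [pvScanA, if_neg hs, h1, h2, Bool.and_self, pvHandle, if_true]

theorem pvFind?_eq_head?_filter {α : Type} (p : α → Bool) (l : List α) :
    l.find? p = (l.filter p).head? := by
  induction l with
  | nil => rfl
  | cons a t ih =>
    cases h : p a
    · rw [List.find?_cons_of_neg (by simp [h]), List.filter_cons_of_neg (by simp [h]), ih]
    · rw [List.find?_cons_of_pos h, List.filter_cons_of_pos h, List.head?_cons]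

-- a fold whose body overwrites the accumulator at candidates computes the last candidate's value
theorem pvFoldl_overwrite {α β : Type} (cand : α → Bool) (f : α → β) (l : List α) (v : β) :
    l.foldl (fun acc x => if cand x then f x else acc) v =
      match (l.filter cand).getLast? with
      | none => v
      | some x => f x := by
  induction l generalizing v with
  | nil => rfl
  | cons a t ih =>
    cases h : cand a
    · rw [List.filter_cons_of_neg (by simp [h])]
      simpa [h] using ih v
    · rw [List.filter_cons_of_pos h]
      rw [List.foldl_cons, if_pos h, ih (f a)]
      cases hft : (t.filter cand).getLast? with
      | none =>
        have : t.filter cand = [] := by simpa using hft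
        simp [this]
      | some x =>
        have hlast : (a :: t.filter cand).getLast? = some x := by
          rw [List.getLast?_cons]; simp [hft]
        rw [hlast]

-- B's step equals the overwrite-with-pvHandle step (the IndexError branch is unreachable)
theorem pvStepB_eq (bs : String) (v : Bool) (x : String) :
    pvStepB (PySem.Str.lower bs) v x =
      if pvCand x then pvHandle (PySem.Str.strip x) bs else v := by
  unfold pvStepB pvCand pvHandle
  by_cases h : (!(PySem.Str.strip x == "") && PySem.Str.isIn "]" (PySem.Str.strip x) &&
      PySem.Str.isIn ":" (PySem.Str.strip x)) = true
  · have hin : PySem.Str.isIn "]" (PySem.Str.strip x) = true :=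
      (Bool.and_eq_true_iff.mp (Bool.and_eq_true_iff.mp h).1).2
    obtain ⟨np, hnp⟩ := pvNamePart_isSome _ hin
    rw [if_pos h, if_pos h, hnp]
  · rw [if_neg h, if_neg h]

-- ===== VERDICT (by name: the statement is the Claim_ definition above) =====
theorem should_reply_spec : Claim_equal_should_reply := by
  intro chat_log bs _
  unfold Spec_should_reply should_reply should_reply_alt
  set lines := PySem.Str.splitlines (PySem.Str.strip chat_log) with hl
  rw [pvScanA_eq_find?, pvFind?_eq_head?_filter, List.filter_reverse, List.head?_reverse]
  show (match (lines.filter pvCand).getLast? with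
      | none => false
      | some l => pvHandle (PySem.Str.strip l) bs) =
    List.foldl (pvStepB (PySem.Str.lower bs)) false lines
  have hstep : (pvStepB (PySem.Str.lower bs)) =
      (fun acc x => if pvCand x then pvHandle (PySem.Str.strip x) bs else acc) :=
    funext fun v => funext fun x => pvStepB_eq bs v x
  rw [hstep, pvFoldl_overwrite]
  cases (List.filter pvCand lines).getLast? <;> rfl
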